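-- pv_equiv track=rewrite | github.com/pritibha-vishwakarma/satellite-pass-predicition | satelite-project/pass_predictor.py | detect_passes
-- ===== SOURCE A (Python) =====
-- def is_visible(position):
--     x, y, z = position
--
--     # Simple distance logic (learning purpose)
--     distance = abs(x) + abs(y) + abs(z)
--
--     if distance < 7000:
--         return True
--     return False
--
-- def detect_passes(positions):
--     passes = []
--     current_pass = None
--
--     for time, pos in positions:
--         if is_visible(pos):
--             if current_pass is None:
--                 current_pass = {"start": time}
--         else:
--             if current_pass:
--                 current_pass["end"] = time
--                 passes.append(current_pass)
--                 current_pass = None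
--
--     return passes
-- ===== SOURCE B (Python) =====
-- def is_visible(position):
--     x, y, z = position
--     distance = abs(x) + abs(y) + abs(z)
--     if distance < 7000:
--         return True
--     return False
--
-- def detect_passes(positions):
--     # Split the timeline into maximal runs of equal visibility, then pair
--     # each visible run with the first timestamp of the following run.
--     runs = []
--     i = 0
--     n = len(positions)
--     while i < n:
--         k = is_visible(positions[i][1])
--         j = i
--         while j < n and is_visible(positions[j][1]) == k:
--             j += 1
--         runs.append((k, positions[i:j]))
--         i = j
--     return [{"start": run[0][0], "end": runs[idx + 1][1][0][0]}
--             for idx, (k, run) in enumerate(runs)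
--             if k and idx + 1 < len(runs)]
-- ===== Notes on version B (the rewrite author's own statement) =====
-- stated objective: alternative
-- what changed: B replaces A's incremental current_pass state machine by a two-phase decomposition: first split the timeline into maximal runs of equal visibility, then pair each visible run that has a successor with the first timestamp of the following invisible run.
import Mathlib
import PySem

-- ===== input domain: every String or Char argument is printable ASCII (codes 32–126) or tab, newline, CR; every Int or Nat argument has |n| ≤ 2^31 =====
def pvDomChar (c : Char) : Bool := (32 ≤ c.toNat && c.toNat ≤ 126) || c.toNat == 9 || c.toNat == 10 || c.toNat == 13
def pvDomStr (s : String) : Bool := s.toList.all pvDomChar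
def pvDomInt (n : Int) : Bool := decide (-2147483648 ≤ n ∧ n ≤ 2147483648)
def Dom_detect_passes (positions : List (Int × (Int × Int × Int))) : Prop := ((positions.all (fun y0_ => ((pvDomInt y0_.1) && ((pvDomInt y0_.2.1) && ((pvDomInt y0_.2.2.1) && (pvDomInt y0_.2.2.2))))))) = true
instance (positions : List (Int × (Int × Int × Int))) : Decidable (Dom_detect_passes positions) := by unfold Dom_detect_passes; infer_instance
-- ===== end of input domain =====

-- B replaces A's incremental current_pass state machine by a two-phase decomposition
-- (split into maximal visibility runs, then pair adjacent runs); same cost, alternative structure.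


-- ===== PORT A =====
def is_visible (position : Int × Int × Int) : Bool :=
  -- distance = abs(x)+abs(y)+abs(z); distance < 7000
  |position.1| + |position.2.1| + |position.2.2| < 7000

-- A's loop state: (passes, current_pass); current_pass is `none` or `some start_time`
-- (the dict {"start": t} is nonempty, hence truthy, whenever it is not None).
def detect_passes_step (acc : List (List (String × Int)) × Option Int)
    (tp : Int × (Int × Int × Int)) : List (List (String × Int)) × Option Int :=
  if is_visible tp.2 then
    match acc.2 with
    | none => (acc.1, some tp.1)
    | some s => (acc.1, some s)
  else
    match acc.2 with
    | some s => (acc.1 ++ [[("start", s), ("end", tp.1)]], none)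
    | none => (acc.1, none)

def detect_passes (positions : List (Int × (Int × Int × Int))) : List (List (String × Int)) :=
  (positions.foldl detect_passes_step ([], none)).1

-- ===== PORT B =====
-- first timestamp of a run; runs built below are never empty (unreachable default 0)
def pvFirstTime (g : List (Int × (Int × Int × Int))) : Int :=
  match g with
  | (t, _) :: _ => t
  | [] => 0

-- split into maximal runs of equal visibility (B's while-loop with positions[i:j])
def pvRuns (l : List (Int × (Int × Int × Int))) : List (Bool × List (Int × (Int × Int × Int))) :=
  match l with
  | [] => []
  | tp :: rest =>
    let k := is_visible tp.2
    (k, tp :: rest.takeWhile (fun q => is_visible q.2 == k)) ::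
      pvRuns (rest.dropWhile (fun q => is_visible q.2 == k))
termination_by l.length
decreasing_by
  simp only [List.length_cons]
  exact Nat.lt_succ_of_le (List.length_dropWhile_le _ _)

-- B's comprehension: a visible run with a successor yields a pass ending at the
-- successor's first timestamp; the trailing run yields nothing.
def pvPair (rs : List (Bool × List (Int × (Int × Int × Int)))) : List (List (String × Int)) :=
  match rs with
  | [] => []
  | [_] => []
  | (k, g) :: (k2, g2) :: rest =>
    (if k then [[("start", pvFirstTime g), ("end", pvFirstTime g2)]] else []) ++
      pvPair ((k2, g2) :: rest)

def detect_passes_alt (positions : List (Int × (Int × Int × Int))) : List (List (String × Int)) :=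
  pvPair (pvRuns positions)

-- ===== PRECONDITION & SPEC =====
def Spec_detect_passes (positions : List (Int × (Int × Int × Int))) (out : List (List (String × Int))) : Prop := out = detect_passes_alt positions
instance (positions : List (Int × (Int × Int × Int))) (out : List (List (String × Int))) : Decidable (Spec_detect_passes positions out) := by unfold Spec_detect_passes; infer_instance

-- ===== CLAIM (what is proved, stated in full; the proofs are below) =====
def Claim_equal_detect_passes : Prop := ∀ (positions : List (Int × (Int × Int × Int))), Dom_detect_passes positions → Spec_detect_passes positions (detect_passes positions)

-- ===== LEMMAS AND PROOFS =====

-- accumulated passes only grow by appending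
theorem detect_passes_shift (m : List (Int × (Int × Int × Int)))
    (acc : List (List (String × Int))) (cur : Option Int) :
    m.foldl detect_passes_step (acc, cur)
      = (acc ++ (m.foldl detect_passes_step ([], cur)).1,
         (m.foldl detect_passes_step ([], cur)).2) := by
  induction m generalizing acc cur with
  | nil => simp
  | cons tp rest ih =>
    simp only [List.foldl_cons]
    rcases cur with _ | s
    · by_cases h : is_visible tp.2
      · rw [show detect_passes_step (acc, none) tp = (acc, some tp.1) by
            simp [detect_passes_step, h],
          show detect_passes_step (([] : List (List (String × Int))), none) tp
              = ([], some tp.1) by simp [detect_passes_step, h]]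
        exact ih acc (some tp.1)
      · rw [show detect_passes_step (acc, none) tp = (acc, none) by
            simp [detect_passes_step, h],
          show detect_passes_step (([] : List (List (String × Int))), none) tp
              = ([], none) by simp [detect_passes_step, h]]
        exact ih acc none
    · by_cases h : is_visible tp.2
      · rw [show detect_passes_step (acc, some s) tp = (acc, some s) by
            simp [detect_passes_step, h],
          show detect_passes_step (([] : List (List (String × Int))), some s) tp
              = ([], some s) by simp [detect_passes_step, h]]
        exact ih acc (some s)
      · rw [show detect_passes_step (acc, some s) tp
              = (acc ++ [[("start", s), ("end", tp.1)]], none) by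
            simp [detect_passes_step, h],
          show detect_passes_step (([] : List (List (String × Int))), some s) tp
              = ([[("start", s), ("end", tp.1)]], none) by simp [detect_passes_step, h]]
        rw [ih (acc ++ [[("start", s), ("end", tp.1)]]) none,
            ih [[("start", s), ("end", tp.1)]] none]
        simp

-- while started (cur = some t), visible samples change nothing
theorem detect_passes_visRun (m : List (Int × (Int × Int × Int)))
    (acc : List (List (String × Int))) (t : Int)
    (h : ∀ x ∈ m, is_visible x.2 = true) :
    m.foldl detect_passes_step (acc, some t) = (acc, some t) := by
  induction m with
  | nil => rfl
  | cons tp rest ih =>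
    have h1 := h tp (by simp)
    simp only [List.foldl_cons, detect_passes_step, h1]
    exact ih (fun x hx => h x (by simp [hx]))

-- while idle (cur = none), invisible samples change nothing
theorem detect_passes_invRun (m : List (Int × (Int × Int × Int)))
    (acc : List (List (String × Int)))
    (h : ∀ x ∈ m, is_visible x.2 = false) :
    m.foldl detect_passes_step (acc, none) = (acc, none) := by
  induction m with
  | nil => rfl
  | cons tp rest ih =>
    have h1 := h tp (by simp)
    simp only [List.foldl_cons, detect_passes_step, h1]
    exact ih (fun x hx => h x (by simp [hx]))

theorem dropWhile_head_false {α : Type} (p : α → Bool) (l : List α) (a : α)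
    (rest : List α) (h : l.dropWhile p = a :: rest) : p a = false := by
  induction l with
  | nil => simp at h
  | cons x xs ih =>
    by_cases hx : p x
    · rw [List.dropWhile_cons_of_pos hx] at h; exact ih h
    · rw [List.dropWhile_cons_of_neg hx] at h
      cases h; simpa using hx

-- pvPair with a leading invisible run ignores it
theorem pvPair_false_cons (g : List (Int × (Int × Int × Int)))
    (rs : List (Bool × List (Int × (Int × Int × Int)))) :
    pvPair ((false, g) :: rs) = pvPair rs := by
  cases rs with
  | nil => rfl
  | cons r rest => cases r; simp [pvPair]

theorem detect_passes_main (l : List (Int × (Int × Int × Int))) :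
    (l.foldl detect_passes_step ([], none)).1 = pvPair (pvRuns l) := by
  match l with
  | [] => simp [pvRuns, pvPair]
  | (t, p) :: rest =>
    have hruns : pvRuns ((t, p) :: rest)
        = (is_visible p,
            (t, p) :: rest.takeWhile (fun q => is_visible q.2 == is_visible p)) ::
          pvRuns (rest.dropWhile (fun q => is_visible q.2 == is_visible p)) := by
      simp only [pvRuns]
    set drop := rest.dropWhile (fun q => is_visible q.2 == is_visible p) with hdrop
    have hsplit := List.takeWhile_append_dropWhile
      (p := fun q => is_visible q.2 == is_visible p) (l := rest)
    have hlen : drop.length < ((t, p) :: rest).length := by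
      have := List.length_dropWhile_le (fun q => is_visible q.2 == is_visible p) rest
      simp only [List.length_cons]
      exact Nat.lt_succ_of_le this
    have ih := detect_passes_main drop
    by_cases hv : is_visible p
    · -- visible head: a pass starts at t
      have htw : ∀ x ∈ rest.takeWhile (fun q => is_visible q.2 == is_visible p),
          is_visible x.2 = true := by
        intro x hx
        have := List.mem_takeWhile_imp hx
        simpa [hv] using this
      have hfold : (((t, p) :: rest).foldl detect_passes_step ([], none))
          = drop.foldl detect_passes_step ([], some t) := by
        conv_lhs => rw [show ((t, p) :: rest) =
          (t, p) :: (rest.takeWhile (fun q => is_visible q.2 == is_visible p) ++ drop) by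
            rw [hsplit]]
        simp only [List.foldl_cons, List.foldl_append]
        rw [show detect_passes_step ([], none) (t, p) = ([], some t) by
          simp [detect_passes_step, hv]]
        rw [detect_passes_visRun _ _ _ htw]
      cases hd : drop with
      | nil =>
        rw [hfold, hd, hruns, hd]
        simp [pvRuns, pvPair]
      | cons tp2 drop' =>
        have hinv : is_visible tp2.2 = false := by
          have := dropWhile_head_false _ rest tp2 drop' (hdrop ▸ hd)
          simpa [hv] using this
        -- A side: process tp2 (end of pass), then continue idle on drop'
        have hA : (((t, p) :: rest).foldl detect_passes_step ([], none)).1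
            = [("start", t), ("end", tp2.1)] :: (drop.foldl detect_passes_step ([], none)).1 := by
          rw [hfold, hd]
          simp only [List.foldl_cons]
          rw [show detect_passes_step ([], some t) tp2
              = ([[("start", t), ("end", tp2.1)]], none) by
            simp [detect_passes_step, hinv]]
          rw [show detect_passes_step (([] : List (List (String × Int))), none) tp2
              = ([], none) by simp [detect_passes_step, hinv]]
          rw [detect_passes_shift]
          simp
        -- B side: head run is visible with a successor starting at tp2.1
        have hB : pvPair (pvRuns ((t, p) :: rest))
            = [("start", t), ("end", tp2.1)] :: pvPair (pvRuns drop) := by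
          rw [hruns, hd]
          rw [show pvRuns (tp2 :: drop') = (is_visible tp2.2,
              tp2 :: drop'.takeWhile (fun q => is_visible q.2 == is_visible tp2.2)) ::
              pvRuns (drop'.dropWhile (fun q => is_visible q.2 == is_visible tp2.2)) by
            simp only [pvRuns]]
          cases tp2 with
          | mk t2 p2 =>
            simp [pvPair, hv, pvFirstTime]
        rw [hA, hB, ih]
    · -- invisible head: nothing starts
      have hvf : is_visible p = false := by simpa using hv
      have htw : ∀ x ∈ rest.takeWhile (fun q => is_visible q.2 == is_visible p),
          is_visible x.2 = false := by
        intro x hx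
        have := List.mem_takeWhile_imp hx
        simpa [hvf] using this
      have hA : (((t, p) :: rest).foldl detect_passes_step ([], none))
          = drop.foldl detect_passes_step ([], none) := by
        conv_lhs => rw [show ((t, p) :: rest) =
          (t, p) :: (rest.takeWhile (fun q => is_visible q.2 == is_visible p) ++ drop) by
            rw [hsplit]]
        simp only [List.foldl_cons, List.foldl_append]
        rw [show detect_passes_step ([], none) (t, p) = ([], none) by
          simp [detect_passes_step, hvf]]
        rw [detect_passes_invRun _ _ htw]
      have hB : pvPair (pvRuns ((t, p) :: rest)) = pvPair (pvRuns drop) := by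
        rw [hruns, hvf]
        exact pvPair_false_cons _ _
      rw [hA, hB, ih]
termination_by l.length
decreasing_by exact hlen

-- ===== VERDICT (by name: the statement is the Claim_ definition above) =====
theorem detect_passes_spec : Claim_equal_detect_passes := by
  intro positions _
  unfold Spec_detect_passes detect_passes detect_passes_alt
  exact detect_passes_main positions
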